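-- pv_equiv track=rewrite | github.com/pypi-data/pypi-mirror-398 | packages/ai-data-science-team/ai_data_science_team-0.0.0.9017-py3-none-any.whl/ai_data_science_team/ml_agents/model_evaluation_agent.py | _choose_positive_label
-- ===== SOURCE A (Python) =====
-- from typing import Any, Optional, Sequence, Dict
--
-- def _choose_positive_label(labels) -> Optional[str]:
--     labels = [str(x) for x in labels if x is not None]
--     if not labels:
--         return None
--     for candidate in ("yes", "true", "1", "churn", "positive"):
--         for lab in labels:
--             if lab.strip().lower() == candidate:
--                 return lab
--     # Prefer "Yes" if present
--     for lab in labels: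
--         if lab.strip().lower() == "yes":
--             return lab
--     # Fall back to the last label to be stable (often the positive class)
--     return labels[-1]
-- ===== SOURCE B (Python) =====
-- _RANK = {"yes": 0, "true": 1, "1": 2, "churn": 3, "positive": 4}
--
-- def _choose_positive_label(labels):
--     labels = [str(x) for x in labels if x is not None]
--     if not labels:
--         return None
--     # single pass: running minimum of the priority rank, keeping the FIRST
--     # label that attains each new minimum (so the first label of minimal rank wins)
--     best, best_rank = None, 5
--     for lab in labels:
--         r = _RANK.get(lab.strip().lower(), 5)
--         if r < best_rank:
--             best, best_rank = lab, r
--     return best if best is not None else labels[-1]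
-- ===== Notes on version B (the rewrite author's own statement) =====
-- stated objective: faster
-- what changed: Replaces A's candidate-by-candidate rescans of the label list (plus the dead second 'yes' scan) with a single argmin pass: each label is normalized once, mapped to its priority rank, and a running minimum keeps the first label attaining the smallest rank.
import Mathlib
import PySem

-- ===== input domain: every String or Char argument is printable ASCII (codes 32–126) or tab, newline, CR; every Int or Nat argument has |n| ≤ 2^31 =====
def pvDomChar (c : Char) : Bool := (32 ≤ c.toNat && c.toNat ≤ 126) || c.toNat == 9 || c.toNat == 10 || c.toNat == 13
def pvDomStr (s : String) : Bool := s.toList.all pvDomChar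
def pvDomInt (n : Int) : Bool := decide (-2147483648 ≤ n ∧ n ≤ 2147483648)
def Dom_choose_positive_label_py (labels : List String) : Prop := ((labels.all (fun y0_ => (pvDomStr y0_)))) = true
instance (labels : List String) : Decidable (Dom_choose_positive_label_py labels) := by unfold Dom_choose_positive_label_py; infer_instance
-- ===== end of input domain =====

-- B replaces A's per-candidate rescans with one argmin pass over the labels
-- (running minimum of a priority rank, first attainer kept); alternative algorithm, same results.


-- lab.strip().lower() (shared by both programs)
def pvNorm (s : String) : List Char := PySem.Chars.lower (PySem.Chars.strip s.toList)

-- ===== PORT A =====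
-- labels : List String, so the 'x is not None' filter and str(x) are identity and are omitted.
-- the candidate priority tuple of A
def pvCands : List (List Char) :=
  ["yes".toList, "true".toList, "1".toList, "churn".toList, "positive".toList]

def choose_positive_label_py (labels : List String) : Option String :=
  if labels.isEmpty then none
  else
    -- for candidate in (...): for lab in labels: if lab.strip().lower() == candidate: return lab
    match pvCands.findSome? (fun cand => labels.find? (fun lab => pvNorm lab == cand)) with
    | some lab => some lab
    | none =>
      -- Prefer "Yes" if present
      match labels.find? (fun lab => pvNorm lab == "yes".toList) with
      | some lab => some lab
      | none =>
        -- return labels[-1]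
        PySem.List.pyGet? labels (-1)

-- ===== PORT B =====
-- _RANK.get(key, 5): the priority rank of a normalized label
def pvRank (key : List Char) : Nat :=
  if key == "yes".toList then 0
  else if key == "true".toList then 1
  else if key == "1".toList then 2
  else if key == "churn".toList then 3
  else if key == "positive".toList then 4
  else 5

def choose_positive_label_py_alt (labels : List String) : Option String :=
  if labels.isEmpty then none
  else
    -- best, best_rank = None, 5; for lab in labels: r = rank; if r < best_rank: best, best_rank = lab, r
    let st := labels.foldl
      (fun (st : Option String × Nat) lab =>
        let r := pvRank (pvNorm lab)
        if r < st.2 then (some lab, r) else st)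
      (none, 5)
    -- return best if best is not None else labels[-1]
    match st.1 with
    | some b => some b
    | none => PySem.List.pyGet? labels (-1)

-- ===== PRECONDITION & SPEC =====
def Spec_choose_positive_label_py (labels : List String) (out : Option String) : Prop := out = choose_positive_label_py_alt labels
instance (labels : List String) (out : Option String) : Decidable (Spec_choose_positive_label_py labels out) := by unfold Spec_choose_positive_label_py; infer_instance

-- ===== CLAIM (what is proved, stated in full; the proofs are below) =====
def Claim_equal_choose_positive_label_py : Prop := ∀ (labels : List String), Dom_choose_positive_label_py labels → Spec_choose_positive_label_py labels (choose_positive_label_py labels)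

-- ===== LEMMAS AND PROOFS =====

-- pointwise-equal predicates search alike
theorem pv_find?_ext {α : Type} (p q : α → Bool) (l : List α)
    (h : ∀ x, p x = q x) : l.find? p = l.find? q := by
  rw [funext h]

-- membership-pointwise-equal functions findSome? alike
theorem pv_findSome?_congr {α β : Type} (f g : α → Option β) (l : List α)
    (h : ∀ x ∈ l, f x = g x) : l.findSome? f = l.findSome? g := by
  induction l with
  | nil => rfl
  | cons a t ih =>
    simp only [List.findSome?_cons, h a (by simp)]
    cases g a with
    | some b => rfl
    | none => exact ih (fun x hx => h x (by simp [hx]))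

-- rank i < 5 is attained exactly at the i-th candidate
theorem pvRank_eq_iff (key : List Char) (i : Nat) (hi : i < 5) :
    (pvRank key == i) = (key == pvCands[i]!) := by
  interval_cases i <;>
    · unfold pvRank pvCands
      split_ifs with h1 h2 h3 h4 h5 <;> simp_all

-- findSome? over range r collapses at the first index k where f is some
theorem range_findSome?_absorb {α : Type} (f : Nat → Option α) (k r : Nat) (a : α)
    (hk : k < r) (hfk : f k = some a) :
    (List.range r).findSome? f = ((List.range k).findSome? f).or (some a) := by
  have hr : r = (k + 1) + (r - (k + 1)) := by omega
  rw [hr, List.range_add, List.findSome?_append, List.range_succ, List.findSome?_append]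
  simp [hfk]

-- the single-pass running minimum equals the staged candidate-by-candidate search
theorem fold_best (ls : List String) (b : Option String) (r : Nat) :
    (ls.foldl
      (fun (st : Option String × Nat) lab =>
        let rk := pvRank (pvNorm lab)
        if rk < st.2 then (some lab, rk) else st)
      (b, r)).1
    = match (List.range r).findSome? (fun i => ls.find? (fun lab => pvRank (pvNorm lab) == i)) with
      | some lab => some lab
      | none => b := by
  induction ls generalizing b r with
  | nil =>
    have h : (List.range r).findSome? (fun _ : Nat => (none : Option String)) = none := by
      simp [List.findSome?_eq_none_iff]
    simp [h]
  | cons lab t ih =>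
    simp only [List.foldl_cons]
    by_cases h : pvRank (pvNorm lab) < r
    · simp only [if_pos h, ih]
      have habs : (List.range r).findSome?
            (fun i => (lab :: t).find? (fun l => pvRank (pvNorm l) == i))
          = ((List.range (pvRank (pvNorm lab))).findSome?
              (fun i => (lab :: t).find? (fun l => pvRank (pvNorm l) == i))).or (some lab) := by
        apply range_findSome?_absorb _ _ _ _ h
        simp
      rw [habs]
      have hcong : (List.range (pvRank (pvNorm lab))).findSome?
            (fun i => (lab :: t).find? (fun l => pvRank (pvNorm l) == i))
          = (List.range (pvRank (pvNorm lab))).findSome?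
            (fun i => t.find? (fun l => pvRank (pvNorm l) == i)) := by
        apply pv_findSome?_congr
        intro i hi
        have : (pvRank (pvNorm lab) == i) = false := by
          simp at hi ⊢; omega
        simp [this]
      rw [hcong]
      cases hx : (List.range (pvRank (pvNorm lab))).findSome?
          (fun i => t.find? (fun l => pvRank (pvNorm l) == i)) <;> simp
    · simp only [if_neg h, ih]
      have hcong : (List.range r).findSome?
            (fun i => (lab :: t).find? (fun l => pvRank (pvNorm l) == i))
          = (List.range r).findSome? (fun i => t.find? (fun l => pvRank (pvNorm l) == i)) := by
        apply pv_findSome?_congr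
        intro i hi
        have : (pvRank (pvNorm lab) == i) = false := by
          simp at hi ⊢; omega
        simp [this]
      rw [hcong]

-- A's nested scans, read as a search over rank indices 0..4
theorem cands_as_range (ls : List String) :
    pvCands.findSome? (fun cand => ls.find? (fun lab => pvNorm lab == cand))
    = (List.range 5).findSome? (fun i => ls.find? (fun lab => pvRank (pvNorm lab) == i)) := by
  have h : ∀ i, i < 5 → ls.find? (fun lab => pvRank (pvNorm lab) == i)
      = ls.find? (fun lab => pvNorm lab == pvCands[i]!) := by
    intro i hi
    exact pv_find?_ext _ _ _ (fun lab => pvRank_eq_iff _ i hi)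
  simp only [List.range, List.range.loop, pvCands, List.findSome?]
  rw [h 0 (by omega), h 1 (by omega), h 2 (by omega), h 3 (by omega), h 4 (by omega)]
  rfl

-- ===== VERDICT (by name: the statement is the Claim_ definition above) =====
theorem choose_positive_label_py_spec : Claim_equal_choose_positive_label_py := by
  intro labels _
  unfold Spec_choose_positive_label_py choose_positive_label_py choose_positive_label_py_alt
  by_cases he : labels.isEmpty
  · simp [he]
  · simp only [he, fold_best, cands_as_range]
    cases hall : (List.range 5).findSome?
        (fun i => labels.find? (fun lab => pvRank (pvNorm lab) == i)) with
    | some lab => rfl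
    | none =>
      -- A's dead "yes" loop finds nothing: rank-0 search already failed
      have h0 := List.findSome?_eq_none_iff.mp hall 0 (by simp)
      have hyes : labels.find? (fun lab => pvNorm lab == "yes".toList) = none := by
        rw [← h0]
        exact pv_find?_ext _ _ _ (fun lab => (pvRank_eq_iff _ 0 (by omega)).symm)
      rw [hyes]
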